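-- pv_equiv track=rewrite | github.com/alexandraback/datacollection | solutions_5639104758808576_1/Python/gingva/ovation.py | solve
-- ===== SOURCE A (Python) =====
-- def solve(counts):
--     clapping = 0
--     fans = 0
--     for i,c in enumerate(counts):
--         addedFans = max(0, i - clapping)
--         clapping += c + addedFans
--         fans += addedFans
--     return fans
-- ===== SOURCE B (Python) =====
-- def solve(counts):
--     prefixes = []
--     total = 0
--     for c in counts:
--         prefixes.append(total)
--         total += c
--     deficits = [i - p for i, p in enumerate(prefixes)]
--     return max(deficits + [0])
-- ===== Notes on version B (the rewrite author's own statement) =====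
-- stated objective: alternative
-- what changed: Replaces the single greedy loop that feeds invited friends back into the clapping total with three staged passes: build the raw prefix-sum list, map it to per-position deficits i - prefix_i, and return the maximum deficit (floored at 0).
import Mathlib
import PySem

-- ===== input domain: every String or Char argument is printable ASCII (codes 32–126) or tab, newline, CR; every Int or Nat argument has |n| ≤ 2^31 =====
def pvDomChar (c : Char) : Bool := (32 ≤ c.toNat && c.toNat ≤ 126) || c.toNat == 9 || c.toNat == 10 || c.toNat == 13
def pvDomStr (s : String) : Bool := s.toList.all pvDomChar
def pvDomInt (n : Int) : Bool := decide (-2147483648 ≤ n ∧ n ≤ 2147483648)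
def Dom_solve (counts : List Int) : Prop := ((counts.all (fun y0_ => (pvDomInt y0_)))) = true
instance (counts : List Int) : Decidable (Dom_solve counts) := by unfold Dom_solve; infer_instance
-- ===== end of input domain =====

-- B replaces A's single greedy loop (invited friends fed back into the clapping total)
-- by three staged passes: prefix sums, per-position deficits, one max.

-- ===== PORT A =====
-- loop state: (i, clapping, fans), one step per element of counts
def solveLoop (counts : List Int) (i clapping fans : Int) : Int :=
  match counts with
  | [] => fans
  | c :: rest =>
    let addedFans := max 0 (i - clapping)
    solveLoop rest (i + 1) (clapping + c + addedFans) (fans + addedFans)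

def solve (counts : List Int) : Int := solveLoop counts 0 0 0

-- ===== PORT B =====
-- first pass: the list of prefix sums (total recorded before each element is added)
def prefixesOf (counts : List Int) (total : Int) : List Int :=
  match counts with
  | [] => []
  | c :: rest => total :: prefixesOf rest (total + c)

-- Python's max(list) with no key is PySem.List.max? with the identity key; the
-- argument list 'deficits ++ [0]' is never empty, so the 'none' branch is unreachable.
def solve_alt (counts : List Int) : Int :=
  let prefixes := prefixesOf counts 0
  let deficits := (PySem.List.enumerate prefixes).map (fun ip => ip.1 - ip.2)
  match PySem.List.max? (deficits ++ [0]) (fun y => y) with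
  | some m => m
  | none => 0

-- ===== PRECONDITION & SPEC =====
def Spec_solve (counts : List Int) (out : Int) : Prop := out = solve_alt counts
instance (counts : List Int) (out : Int) : Decidable (Spec_solve counts out) := by unfold Spec_solve; infer_instance

-- ===== CLAIM (what is proved, stated in full; the proofs are below) =====
def Claim_equal_solve : Prop := ∀ (counts : List Int), Dom_solve counts → Spec_solve counts (solve counts)

-- ===== LEMMAS AND PROOFS =====
-- proof-only abstraction: the deficit list i-p, (i+1)-(p+c), … that both sides compute
def defsOf (counts : List Int) (i p : Int) : List Int :=
  match counts with
  | [] => []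
  | c :: rest => (i - p) :: defsOf rest (i + 1) (p + c)

-- A's loop is the running max of the deficits: clapping = p + fans, fans = running max.
theorem solveLoop_eq_foldl (counts : List Int) :
    ∀ (i p f : Int), solveLoop counts i (p + f) f = (defsOf counts i p).foldl max f := by
  induction counts with
  | nil => intro i p f; rfl
  | cons c rest ih =>
    intro i p f
    simp only [solveLoop, defsOf, List.foldl_cons]
    have h1 : f + max 0 (i - (p + f)) = max f (i - p) := by
      rcases le_total f (i - p) with h | h
      · rw [max_eq_right (by omega), max_eq_right h]; omega
      · rw [max_eq_left (by omega), max_eq_left h]; omega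
    have h2 : p + f + c + max 0 (i - (p + f)) = (p + c) + (f + max 0 (i - (p + f))) := by ring
    rw [h2, ih, h1]

-- B's deficit pass computes the same list
theorem map_enumerate_prefixes (counts : List Int) :
    ∀ (i p : Int),
      (PySem.List.enumerate (prefixesOf counts p) i).map (fun ip => ip.1 - ip.2)
        = defsOf counts i p := by
  induction counts with
  | nil => intro i p; rfl
  | cons c rest ih =>
    intro i p
    simp only [prefixesOf, defsOf, PySem.List.enumerate_cons, List.map_cons, ih]

theorem foldl_max_comm (t : List Int) : ∀ (a b : Int), t.foldl max (max a b) = max a (t.foldl max b) := by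
  induction t with
  | nil => intro a b; rfl
  | cons x xs ih =>
    intro a b
    simp only [List.foldl_cons, max_assoc, ih]

-- ===== VERDICT (by name: the statement is the Claim_ definition above) =====
theorem solve_spec : Claim_equal_solve := by
  intro counts _
  unfold Spec_solve solve solve_alt
  have hA : solveLoop counts 0 0 0 = (defsOf counts 0 0).foldl max 0 := by
    simpa using solveLoop_eq_foldl counts 0 0 0
  simp only [hA, map_enumerate_prefixes counts 0 0]
  cases h : defsOf counts 0 0 with
  | nil => simp [PySem.List.max?]
  | cons x t =>
    simp only [List.cons_append, PySem.List.max?_id_cons]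
    rw [List.foldl_cons, List.foldl_append]
    simp only [List.foldl_cons, List.foldl_nil]
    -- goal: t.foldl max (max 0 x) = max (t.foldl max x) 0
    rw [foldl_max_comm t 0 x, max_comm]
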